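-- pv_equiv track=rewrite | github.com/fman-users/Core | core/quicksearch_matchers.py | contains_chars
-- ===== SOURCE A (Python) =====
-- def contains_chars(text, query):
-- 	indices = []
-- 	i = 0
-- 	for char in query:
-- 		try:
-- 			i += text[i:].index(char)
-- 		except ValueError:
-- 			return None
-- 		indices.append(i)
-- 		i += 1
-- 	return indices
-- ===== SOURCE B (Python) =====
-- def contains_chars(text, query):
--     indices = []
--     qi = 0
--     for pos, ch in enumerate(text):
--         if qi == len(query):
--             break
--         if ch == query[qi]:
--             indices.append(pos)
--             qi += 1
--     return indices if qi == len(query) else None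
-- ===== Notes on version B (the rewrite author's own statement) =====
-- stated objective: faster
-- what changed: Single enumerate pass over text with a query pointer replaces the loop over query that repeatedly slices text and calls .index on the slice.
import Mathlib
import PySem

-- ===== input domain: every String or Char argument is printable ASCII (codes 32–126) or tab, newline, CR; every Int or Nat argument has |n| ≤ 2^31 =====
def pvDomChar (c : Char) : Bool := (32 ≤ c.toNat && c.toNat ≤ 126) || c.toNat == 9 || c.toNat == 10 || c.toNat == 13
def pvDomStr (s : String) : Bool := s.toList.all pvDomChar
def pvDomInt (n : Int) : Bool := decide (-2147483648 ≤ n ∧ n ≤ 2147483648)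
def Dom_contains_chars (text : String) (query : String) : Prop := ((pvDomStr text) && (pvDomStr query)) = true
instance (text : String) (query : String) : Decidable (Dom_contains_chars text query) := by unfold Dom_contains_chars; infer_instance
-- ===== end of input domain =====

-- B replaces A's per-query-character suffix slicing + .index search by one enumerate pass
-- over text with a query pointer (objective: faster, no repeated suffix copies).

-- ===== PORT A =====
-- A's loop over query: i += text[i:].index(char) (ValueError → None), append i, i += 1.
-- text[i:] is PySem.Chars.slice … (some i) none; str.index of the single character char
-- is the first occurrence of that char, i.e. PySem.List.index? on the code points (exact).
def ccA_loop (t : List Char) : List Char → List Int → Int → Option (List Int)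
  | [], indices, _ => some indices
  | c :: q, indices, i =>
    match PySem.List.index? (PySem.Chars.slice t (some i) none) c with
    | none => none
    | some k => ccA_loop t q (indices ++ [i + (k : Int)]) (i + (k : Int) + 1)

def contains_chars (text : String) (query : String) : Option (List Int) :=
  ccA_loop text.toList query.toList [] 0

-- ===== PORT B =====
-- One pass over text (enumerate): pos is the running index, qi the query pointer.
-- query[qi] is only read under qi ≠ len(query), where qi < len(query) holds, so getD is exact.
def ccB_loop (q : List Char) : List Char → Int → Nat → List Int → Nat × List Int
  | [], _, qi, indices => (qi, indices)
  | ch :: t, pos, qi, indices =>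
    if qi = q.length then (qi, indices)
    else if ch = q.getD qi ' ' then ccB_loop q t (pos + 1) (qi + 1) (indices ++ [pos])
    else ccB_loop q t (pos + 1) qi indices

def contains_chars_alt (text : String) (query : String) : Option (List Int) :=
  let r := ccB_loop query.toList text.toList 0 0 []
  if r.1 = query.toList.length then some r.2 else none

-- ===== PRECONDITION & SPEC =====
def Spec_contains_chars (text : String) (query : String) (out : Option (List Int)) : Prop := out = contains_chars_alt text query
instance (text : String) (query : String) (out : Option (List Int)) : Decidable (Spec_contains_chars text query out) := by unfold Spec_contains_chars; infer_instance

-- ===== CLAIM (what is proved, stated in full; the proofs are below) =====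
def Claim_equal_contains_chars : Prop := ∀ (text : String) (query : String), Dom_contains_chars text query → Spec_contains_chars text query (contains_chars text query)

-- ===== LEMMAS AND PROOFS =====

-- Common reference: char-by-char greedy subsequence match, positions offset by n.
def ccGreedy : List Char → List Char → Nat → Option (List Int)
  | _, [], _ => some []
  | [], _ :: _, _ => none
  | ch :: t, c :: q, n =>
    if ch = c then (ccGreedy t q (n + 1)).map (fun l => ((n : Int) :: l))
    else ccGreedy t (c :: q) (n + 1)

lemma ccGreedy_index? (rest : List Char) (c : Char) (q : List Char) (n : Nat) :
    ccGreedy rest (c :: q) n =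
      match PySem.List.index? rest c with
      | none => none
      | some k => (ccGreedy (rest.drop (k + 1)) q (n + k + 1)).map
          (fun l => (((n + k : Nat) : Int) :: l)) := by
  induction rest generalizing n with
  | nil => simp [ccGreedy, PySem.List.index?]
  | cons ch t ih =>
    by_cases h : ch = c
    · subst h
      rw [PySem.List.index?_cons_self]
      simp [ccGreedy]
    · rw [PySem.List.index?_cons_of_ne t h]
      simp only [ccGreedy, if_neg h]
      rw [ih (n + 1)]
      cases hk : PySem.List.index? t c with
      | none => simp
      | some k =>
        simp only [Option.map_some]
        have h1 : n + 1 + k + 1 = n + (k + 1) + 1 := by omega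
        have h2 : (n + 1 + k : Nat) = (n + (k + 1) : Nat) := by omega
        rw [h1, h2, List.drop_succ_cons]

lemma ccA_loop_eq_greedy (t : List Char) (q : List Char) :
    ∀ (n : Nat) (acc : List Int),
      ccA_loop t q acc (n : Int) = (ccGreedy (t.drop n) q n).map (fun l => acc ++ l) := by
  induction q with
  | nil => intro n acc; simp [ccA_loop, ccGreedy]
  | cons c q ih =>
    intro n acc
    rw [ccA_loop]
    simp only [PySem.Chars.slice]
    rw [PySem.List.slice_from_natCast, ccGreedy_index?]
    cases hk : PySem.List.index? (t.drop n) c with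
    | none => simp
    | some k =>
      simp only [List.drop_drop]
      have h1 : ((n : Int) + (k : Int) + 1) = ((n + k + 1 : Nat) : Int) := by push_cast; ring
      have h2 : n + (k + 1) = n + k + 1 := by omega
      rw [h1, h2, ih (n + k + 1)]
      cases ccGreedy (t.drop (n + k + 1)) q (n + k + 1) with
      | none => simp
      | some l => simp

lemma ccB_loop_eq_greedy (q : List Char) (t : List Char) :
    ∀ (n : Nat) (qi : Nat) (acc : List Int), qi ≤ q.length →
      (if (ccB_loop q t (n : Int) qi acc).1 = q.length
       then some (ccB_loop q t (n : Int) qi acc).2 else none)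
        = (ccGreedy t (q.drop qi) n).map (fun l => acc ++ l) := by
  induction t with
  | nil =>
    intro n qi acc hqi
    simp only [ccB_loop]
    by_cases h : qi = q.length
    · subst h; simp [List.drop_length, ccGreedy]
    · have : q.drop qi ≠ [] := by
        intro hd
        have := List.drop_eq_nil_iff.mp hd
        omega
      cases hq : q.drop qi with
      | nil => exact absurd hq this
      | cons c q' => simp [ccGreedy, if_neg h]
  | cons ch t ihp =>
    intro n qi acc hqi
    by_cases h : qi = q.length
    · subst h
      simp [ccB_loop, List.drop_length, ccGreedy]
    · have hlt : qi < q.length := lt_of_le_of_ne hqi h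
      have hq : q.drop qi = q[qi] :: q.drop (qi + 1) := List.drop_eq_getElem_cons hlt
      have hget : q.getD qi ' ' = q[qi] := List.getD_eq_getElem q ' ' hlt
      rw [hq]
      simp only [ccB_loop, if_neg h, hget]
      by_cases hc : ch = q[qi]
      · rw [if_pos hc]
        have h1 : (n : Int) + 1 = ((n + 1 : Nat) : Int) := by push_cast; ring
        rw [h1, ihp (n + 1) (qi + 1) (acc ++ [(n : Int)]) (by omega)]
        simp only [ccGreedy, if_pos hc]
        cases ccGreedy t (q.drop (qi + 1)) (n + 1) with
        | none => simp
        | some l => simp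
      · rw [if_neg hc]
        have h1 : (n : Int) + 1 = ((n + 1 : Nat) : Int) := by push_cast; ring
        rw [h1, ihp (n + 1) qi acc hqi, hq]
        simp only [ccGreedy, if_neg hc]

-- ===== VERDICT (by name: the statement is the Claim_ definition above) =====
theorem contains_chars_spec : Claim_equal_contains_chars := by
  intro text query _
  unfold Spec_contains_chars contains_chars contains_chars_alt
  have hA := ccA_loop_eq_greedy text.toList query.toList 0 []
  have hB := ccB_loop_eq_greedy query.toList text.toList 0 0 [] (Nat.zero_le _)
  simp only [Nat.cast_zero, List.drop_zero, List.nil_append, Option.map_id'] at hA hB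
  rw [hA, ← hB]
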